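-- pv_equiv track=rewrite | github.com/dodgejoel/graph | graphs.py | dfs
-- ===== SOURCE A (Python) =====
-- def explore(G, v, visited, pre_post, count):
--
--     visited[v] = True
--     pre_post[v].append(count)
--     count += 1
--
--     for u in G[v]:
--         if not visited[u]:
--             count = explore(G, u, visited, pre_post, count)
--     pre_post[v].append(count)
--     count += 1
--     return count
--
-- def dfs(G, visited = []):
--     '''
--     Depth first search through vertices of G.
--     Returns the number of connected components of G.
--     '''
--
--     visited = dict([(v, False) for v in G])
--     pre_post = dict([(v, []) for v in G])
--     count = 0
--
--     for v in G:
--         if not visited[v]: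
--             count = explore(G, v, visited, pre_post, count)
--     return pre_post
-- ===== SOURCE B (Python) =====
-- def dfs(G, visited = []):
--     '''
--     Depth first search through vertices of G.
--     Iterative version: explicit stack of (vertex, is_exit) frames.
--     '''
--     visited = {v: False for v in G}
--     pre_post = {v: [] for v in G}
--     count = 0
--
--     for s in G:
--         if visited[s]:
--             continue
--         stack = [(s, False)]
--         while stack:
--             v, is_exit = stack.pop()
--             if is_exit:
--                 pre_post[v].append(count)
--                 count += 1
--             elif not visited[v]:
--                 visited[v] = True
--                 pre_post[v].append(count)
--                 count += 1
--                 stack.append((v, True))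
--                 for u in reversed(G[v]):
--                     stack.append((u, False))
--     return pre_post
-- ===== Notes on version B (the rewrite author's own statement) =====
-- stated objective: alternative
-- what changed: The recursive explore helper is replaced by an iterative DFS driven by an explicit stack of (vertex, is_exit) frames, with post-numbers recorded via exit markers and the visited check done at pop time.
import Mathlib
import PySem

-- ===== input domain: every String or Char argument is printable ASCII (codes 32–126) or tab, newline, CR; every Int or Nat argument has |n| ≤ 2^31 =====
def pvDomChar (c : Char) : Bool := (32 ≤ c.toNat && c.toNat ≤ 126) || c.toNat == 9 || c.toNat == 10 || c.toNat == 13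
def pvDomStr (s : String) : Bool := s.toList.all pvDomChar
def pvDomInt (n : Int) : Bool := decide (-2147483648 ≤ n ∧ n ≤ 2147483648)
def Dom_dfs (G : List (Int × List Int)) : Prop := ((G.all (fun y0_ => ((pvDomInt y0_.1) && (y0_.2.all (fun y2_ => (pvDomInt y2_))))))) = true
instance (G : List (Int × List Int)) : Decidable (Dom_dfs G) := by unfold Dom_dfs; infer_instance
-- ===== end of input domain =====

-- B replaces A's recursive explore by an iterative DFS over an explicit stack of (vertex, is_exit)
-- frames (objective: alternative decomposition, same asymptotic cost).

-- ===== PORT A =====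
-- A's recursive explore: fuel bounds only the recursion DEPTH (each level marks a fresh vertex, so
-- depth ≤ |G| and fuel G.length + 1 is never exhausted on Pre_ inputs); loopA is the `for u in G[v]` loop.
mutual
def exploreA (fuel : Nat) (Gd : PySem.Dict Int (List Int)) (v : Int)
    (vis : PySem.Dict Int Bool) (pp : PySem.Dict Int (List Int)) (c : Int) :
    PySem.Dict Int Bool × PySem.Dict Int (List Int) × Int :=
  match fuel with
  | 0 => (vis, pp, c)
  | f + 1 =>
    let st := loopA f Gd (Gd.getD v []) (vis.insert v true) (pp.modify v [] (fun l => l ++ [c])) (c + 1)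
    (st.1, st.2.1.modify v [] (fun l => l ++ [st.2.2]), st.2.2 + 1)
  termination_by (fuel, 0)

def loopA (fuel : Nat) (Gd : PySem.Dict Int (List Int)) (us : List Int)
    (vis : PySem.Dict Int Bool) (pp : PySem.Dict Int (List Int)) (c : Int) :
    PySem.Dict Int Bool × PySem.Dict Int (List Int) × Int :=
  match us with
  | [] => (vis, pp, c)
  | u :: rest =>
    if vis.getD u false then loopA fuel Gd rest vis pp c
    else
      let st := exploreA fuel Gd u vis pp c
      loopA fuel Gd rest st.1 st.2.1 st.2.2
  termination_by (fuel, us.length + 1)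
end

def dfs (G : List (Int × List Int)) : List (Int × List Int) :=
  let Gd : PySem.Dict Int (List Int) := PySem.Dict.mk G
  let vis0 : PySem.Dict Int Bool := PySem.Dict.ofList (G.map (fun p => (p.1, false)))
  let pp0 : PySem.Dict Int (List Int) := PySem.Dict.ofList (G.map (fun p => (p.1, ([] : List Int))))
  let st := G.foldl
    (fun st p => if st.1.getD p.1 false then st
                 else exploreA (G.length + 1) Gd p.1 st.1 st.2.1 st.2.2)
    (vis0, pp0, (0 : Int))
  st.2.1.items

-- ===== PORT B =====
-- Source B's while-loop over the stack; the Python list's TOP (its right end) is the HEAD of this list,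
-- so `push (v,True); push reversed(G[v])` makes the stack `G[v]-enters ++ (v,true) :: rest`.
-- fuel decreases only on a fresh-enter step (each marks a fresh vertex), so fuel G.length + 1 suffices.
def runB (fuel : Nat) (Gd : PySem.Dict Int (List Int)) (stack : List (Int × Bool))
    (vis : PySem.Dict Int Bool) (pp : PySem.Dict Int (List Int)) (c : Int) :
    PySem.Dict Int Bool × PySem.Dict Int (List Int) × Int :=
  match stack with
  | [] => (vis, pp, c)
  | (v, isExit) :: rest =>
    if isExit then runB fuel Gd rest vis (pp.modify v [] (fun l => l ++ [c])) (c + 1)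
    else if vis.getD v false then runB fuel Gd rest vis pp c
    else
      match fuel with
      | 0 => (vis, pp, c)
      | f + 1 =>
        runB f Gd ((Gd.getD v []).map (fun u => (u, false)) ++ (v, true) :: rest)
          (vis.insert v true) (pp.modify v [] (fun l => l ++ [c])) (c + 1)
termination_by (fuel, stack.length)

def dfs_alt (G : List (Int × List Int)) : List (Int × List Int) :=
  let Gd : PySem.Dict Int (List Int) := PySem.Dict.mk G
  let vis0 : PySem.Dict Int Bool := PySem.Dict.ofList (G.map (fun p => (p.1, false)))
  let pp0 : PySem.Dict Int (List Int) := PySem.Dict.ofList (G.map (fun p => (p.1, ([] : List Int))))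
  let st := G.foldl
    (fun st p => if st.1.getD p.1 false then st
                 else runB (G.length + 1) Gd [(p.1, false)] st.1 st.2.1 st.2.2)
    (vis0, pp0, (0 : Int))
  st.2.1.items

-- ===== PRECONDITION & SPEC =====
-- Pre_ excludes (a) association lists with duplicate keys, which are not a faithful image of A's dict
-- parameter (Python's dict collapses them last-wins, the list keeps both), and (b) graphs with a
-- neighbour that is not a key of G, on which A raises KeyError at `visited[u]`.
def Pre_dfs (G : List (Int × List Int)) : Prop :=
  (G.map Prod.fst).Nodup ∧ ∀ p ∈ G, ∀ u ∈ p.2, u ∈ G.map Prod.fst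
instance (G : List (Int × List Int)) : Decidable (Pre_dfs G) := by unfold Pre_dfs; infer_instance

def pvWitness_dfs : (List (Int × List Int)) := [(0, [1]), (1, [0]), (2, [])]

def Spec_dfs (G : List (Int × List Int)) (out : List (Int × List Int)) : Prop := out = dfs_alt G
instance (G : List (Int × List Int)) (out : List (Int × List Int)) : Decidable (Spec_dfs G out) := by unfold Spec_dfs; infer_instance

-- ===== CLAIM (what is proved, stated in full; the proofs are below) =====
def Claim_equal_dfs : Prop := ∀ (G : List (Int × List Int)), Dom_dfs G → Pre_dfs G → Spec_dfs G (dfs G)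

-- ===== LEMMAS AND PROOFS =====

-- visited-dict monotonicity and the unvisited-key count, the measures of the whole development
def VisMono (vis vis' : PySem.Dict Int Bool) : Prop :=
  ∀ u, vis.getD u false = true → vis'.getD u false = true

def Ucnt (keys : List Int) (vis : PySem.Dict Int Bool) : Nat :=
  keys.countP (fun v => !vis.getD v false)

def StackOK (keys : List Int) (stack : List (Int × Bool)) : Prop :=
  ∀ x ∈ stack, x.1 ∈ keys

def ClosedG (keys : List Int) (Gd : PySem.Dict Int (List Int)) : Prop :=
  ∀ w : Int, ∀ u ∈ Gd.getD w [], u ∈ keys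

theorem visMono_refl (vis : PySem.Dict Int Bool) : VisMono vis vis := fun _ h => h

theorem visMono_trans {a b c : PySem.Dict Int Bool} (h1 : VisMono a b) (h2 : VisMono b c) :
    VisMono a c := fun u h => h2 u (h1 u h)

theorem visMono_insert (vis : PySem.Dict Int Bool) (v : Int) :
    VisMono vis (vis.insert v true) := by
  intro u h
  rw [PySem.Dict.getD_insert]
  split <;> simp [h]

theorem U_mono {keys : List Int} {vis vis' : PySem.Dict Int Bool} (h : VisMono vis vis') :
    Ucnt keys vis' ≤ Ucnt keys vis := by
  apply List.countP_mono_left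
  intro x _ hx
  simp only [Bool.not_eq_true'] at hx ⊢
  by_cases hc : vis.getD x false = true
  · exact absurd (h x hc) (by simp [hx])
  · simpa using hc

theorem U_strict {keys : List Int} {vis vis' : PySem.Dict Int Bool} (h : VisMono vis vis')
    {v : Int} (hv : v ∈ keys) (h0 : vis.getD v false = false) (h1 : vis'.getD v false = true) :
    Ucnt keys vis' < Ucnt keys vis := by
  induction keys with
  | nil => cases hv
  | cons k ks ih =>
    simp only [Ucnt, List.countP_cons] at *
    rcases List.mem_cons.mp hv with rfl | hmem
    · have hle : Ucnt ks vis' ≤ Ucnt ks vis := U_mono h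
      simp only [Ucnt] at hle
      simp [h0, h1]; omega
    · have := ih hmem
      have hif : (if !vis'.getD k false then 1 else 0) ≤ (if !vis.getD k false then 1 else 0) := by
        by_cases hk : vis.getD k false = true
        · simp [h k hk]
        · simp only [Bool.not_eq_true] at hk; simp [hk]; split <;> omega
      omega

theorem U_pos {keys : List Int} {vis : PySem.Dict Int Bool} {v : Int}
    (hv : v ∈ keys) (h0 : vis.getD v false = false) : 1 ≤ Ucnt keys vis := by
  have : 0 < Ucnt keys vis := List.countP_pos_iff.mpr ⟨v, hv, by simp [h0]⟩
  omega

theorem U_le_len (keys : List Int) (vis : PySem.Dict Int Bool) :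
    Ucnt keys vis ≤ keys.length := List.countP_le_length

-- ---- monotonicity of the two machines ----

theorem loopA_mono_of (f : Nat) (Gd : PySem.Dict Int (List Int))
    (hexp : ∀ v vis pp c, VisMono vis (exploreA f Gd v vis pp c).1) :
    ∀ us vis pp c, VisMono vis (loopA f Gd us vis pp c).1 := by
  intro us
  induction us with
  | nil => intro vis pp c; rw [loopA]; exact visMono_refl _
  | cons u rest ih =>
    intro vis pp c
    rw [loopA]
    by_cases hu : vis.getD u false = true
    · simp only [hu, if_true]; exact ih vis pp c
    · simp only [hu, Bool.false_eq_true, if_false]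
      exact visMono_trans (hexp u vis pp c) (ih _ _ _)

theorem exploreA_mono : ∀ (f : Nat) (Gd : PySem.Dict Int (List Int)) (v : Int) vis pp c,
    VisMono vis (exploreA f Gd v vis pp c).1 := by
  intro f
  induction f with
  | zero => intro Gd v vis pp c; rw [exploreA]; exact visMono_refl _
  | succ f ih =>
    intro Gd v vis pp c
    rw [exploreA]
    exact visMono_trans (visMono_insert vis v) (loopA_mono_of f Gd (ih Gd) _ _ _ _)

theorem runB_nil (f : Nat) (Gd : PySem.Dict Int (List Int)) (vis pp c) :
    runB f Gd [] vis pp c = (vis, pp, c) := by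
  rw [runB.eq_1]

theorem runB_exit (f : Nat) (Gd : PySem.Dict Int (List Int)) (v : Int) (rest vis pp c) :
    runB f Gd ((v, true) :: rest) vis pp c =
      runB f Gd rest vis (pp.modify v [] (fun l => l ++ [c])) (c + 1) := by
  cases f <;> rw [runB] <;> simp

theorem runB_skip (f : Nat) (Gd : PySem.Dict Int (List Int)) (v : Int) (rest vis pp c)
    (h : vis.getD v false = true) :
    runB f Gd ((v, false) :: rest) vis pp c = runB f Gd rest vis pp c := by
  cases f <;> rw [runB] <;> simp [h]

theorem runB_enter (f : Nat) (Gd : PySem.Dict Int (List Int)) (v : Int) (rest vis pp c)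
    (h : vis.getD v false = false) :
    runB (f + 1) Gd ((v, false) :: rest) vis pp c =
      runB f Gd ((Gd.getD v []).map (fun u => (u, false)) ++ (v, true) :: rest)
        (vis.insert v true) (pp.modify v [] (fun l => l ++ [c])) (c + 1) := by
  rw [runB]; simp [h]

theorem runB_irr (keys : List Int) (Gd : PySem.Dict Int (List Int)) (hcl : ClosedG keys Gd) :
    ∀ (n : Nat) stack f₁ f₂ vis pp c, StackOK keys stack →
      Ucnt keys vis ≤ n → Ucnt keys vis < f₁ → Ucnt keys vis < f₂ →
      runB f₁ Gd stack vis pp c = runB f₂ Gd stack vis pp c := by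
  intro n
  induction n using Nat.strong_induction_on with
  | _ n ih =>
    intro stack
    induction stack with
    | nil => intro f₁ f₂ vis pp c _ _ _ _; rw [runB_nil, runB_nil]
    | cons x rest ihs =>
      obtain ⟨v, isExit⟩ := x
      intro f₁ f₂ vis pp c hOK hn h1 h2
      have hOKr : StackOK keys rest := fun y hy => hOK y (List.mem_cons_of_mem _ hy)
      cases isExit with
      | true =>
        rw [runB_exit, runB_exit]
        exact ihs f₁ f₂ vis _ _ hOKr hn h1 h2
      | false =>
        by_cases hv : vis.getD v false = true
        · rw [runB_skip _ _ _ _ _ _ _ hv, runB_skip _ _ _ _ _ _ _ hv]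
          exact ihs f₁ f₂ vis pp c hOKr hn h1 h2
        · simp only [Bool.not_eq_true] at hv
          have hvk : v ∈ keys := hOK (v, false) List.mem_cons_self
          have hU1 : 1 ≤ Ucnt keys vis := U_pos hvk hv
          match f₁, f₂ with
          | g₁ + 1, g₂ + 1 =>
            rw [runB_enter _ _ _ _ _ _ _ hv, runB_enter _ _ _ _ _ _ _ hv]
            have hlt : Ucnt keys (vis.insert v true) < Ucnt keys vis :=
              U_strict (visMono_insert vis v) hvk hv (PySem.Dict.getD_insert_self _ _ _ _)
            have hOK' : StackOK keys ((Gd.getD v []).map (fun u => (u, false)) ++ (v, true) :: rest) := by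
              intro y hy
              rcases List.mem_append.mp hy with hy | hy
              · obtain ⟨u, hu, rfl⟩ := List.mem_map.mp hy
                exact hcl v u hu
              · rcases List.mem_cons.mp hy with rfl | hy
                · exact hvk
                · exact hOKr y hy
            exact ih (n - 1) (by omega) _ g₁ g₂ _ _ _ hOK' (by omega) (by omega) (by omega)

-- ---- the simulation: one fresh-enter frame behaves like one explore call ----

theorem loopA_sim (keys : List Int) (Gd : PySem.Dict Int (List Int)) (_hcl : ClosedG keys Gd)
    (n : Nat)
    (hexp : ∀ f v vis pp c rest, StackOK keys rest → v ∈ keys → vis.getD v false = false →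
      Ucnt keys vis ≤ n → Ucnt keys vis < f →
      runB f Gd ((v, false) :: rest) vis pp c =
        runB f Gd rest (exploreA f Gd v vis pp c).1 (exploreA f Gd v vis pp c).2.1
          (exploreA f Gd v vis pp c).2.2) :
    ∀ us f vis pp c tail, (∀ u ∈ us, u ∈ keys) → StackOK keys tail →
      Ucnt keys vis ≤ n → Ucnt keys vis < f →
      runB f Gd (us.map (fun u => (u, false)) ++ tail) vis pp c =
        runB f Gd tail (loopA f Gd us vis pp c).1 (loopA f Gd us vis pp c).2.1
          (loopA f Gd us vis pp c).2.2 := by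
  intro us
  induction us with
  | nil =>
    intro f vis pp c tail _ _ _ _
    rw [loopA]; simp only [List.map_nil, List.nil_append]
  | cons u rest ih =>
    intro f vis pp c tail hus htail hn hf
    rw [loopA]
    simp only [List.map_cons, List.cons_append]
    by_cases hu : vis.getD u false = true
    · rw [runB_skip _ _ _ _ _ _ _ hu]
      simp only [hu, if_true]
      exact ih f vis pp c tail (fun x hx => hus x (List.mem_cons_of_mem _ hx)) htail hn hf
    · simp only [Bool.not_eq_true] at hu
      simp only [hu, Bool.false_eq_true, if_false]
      have hOK' : StackOK keys (rest.map (fun u => (u, false)) ++ tail) := by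
        intro y hy
        rcases List.mem_append.mp hy with hy | hy
        · obtain ⟨w, hw, rfl⟩ := List.mem_map.mp hy
          exact hus w (List.mem_cons_of_mem _ hw)
        · exact htail y hy
      rw [hexp f u vis pp c _ hOK' (hus u List.mem_cons_self) hu hn hf]
      have hle := U_mono (keys := keys) (exploreA_mono f Gd u vis pp c)
      exact ih f _ _ _ tail (fun x hx => hus x (List.mem_cons_of_mem _ hx)) htail
        (le_trans hle hn) (lt_of_le_of_lt hle hf)

theorem exploreA_sim (keys : List Int) (Gd : PySem.Dict Int (List Int)) (hcl : ClosedG keys Gd) :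
    ∀ (n : Nat) f v vis pp c rest, StackOK keys rest → v ∈ keys → vis.getD v false = false →
      Ucnt keys vis ≤ n → Ucnt keys vis < f →
      runB f Gd ((v, false) :: rest) vis pp c =
        runB f Gd rest (exploreA f Gd v vis pp c).1 (exploreA f Gd v vis pp c).2.1
          (exploreA f Gd v vis pp c).2.2 := by
  intro n
  induction n using Nat.strong_induction_on with
  | _ n ih =>
    intro f v vis pp c rest hOK hv h0 hn hf
    have hU1 : 1 ≤ Ucnt keys vis := U_pos hv h0
    match f with
    | g + 1 =>
      rw [runB_enter _ _ _ _ _ _ _ h0]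
      have hlt : Ucnt keys (vis.insert v true) < Ucnt keys vis :=
        U_strict (visMono_insert vis v) hv h0 (PySem.Dict.getD_insert_self _ _ _ _)
      have hOKc : StackOK keys ((v, true) :: rest) := by
        intro y hy
        rcases List.mem_cons.mp hy with rfl | hy
        · exact hv
        · exact hOK y hy
      rw [loopA_sim keys Gd hcl (n - 1)
        (fun f' v' vis' pp' c' rest' hOK' hv' h0' hn' hf' =>
          ih (n - 1) (by omega) f' v' vis' pp' c' rest' hOK' hv' h0' hn' hf')
        (Gd.getD v []) g _ _ _ ((v, true) :: rest) (fun u hu => hcl v u hu) hOKc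
        (by omega) (by omega)]
      rw [runB_exit]
      rw [exploreA]
      have hle := U_mono (keys := keys)
        (loopA_mono_of g Gd (exploreA_mono g Gd) (Gd.getD v []) (vis.insert v true)
          (pp.modify v [] (fun l => l ++ [c])) (c + 1))
      exact runB_irr keys Gd hcl n rest g (g + 1) _ _ _ hOK (by omega) (by omega) (by omega)

-- ---- the outer loops agree ----

theorem fold_sim (keys : List Int) (Gd : PySem.Dict Int (List Int)) (hcl : ClosedG keys Gd)
    (F : Nat) (hF : keys.length < F) :
    ∀ (l : List (Int × List Int)) vis pp c, (∀ p ∈ l, p.1 ∈ keys) →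
      l.foldl (fun st p => if st.1.getD p.1 false then st
                           else exploreA F Gd p.1 st.1 st.2.1 st.2.2) (vis, pp, c) =
      l.foldl (fun st p => if st.1.getD p.1 false then st
                           else runB F Gd [(p.1, false)] st.1 st.2.1 st.2.2) (vis, pp, c) := by
  intro l
  induction l with
  | nil => intro vis pp c _; rfl
  | cons p rest ih =>
    intro vis pp c hl
    simp only [List.foldl_cons]
    by_cases hv : vis.getD p.1 false = true
    · simp only [hv, if_true]
      exact ih _ _ _ (fun q hq => hl q (List.mem_cons_of_mem _ hq))
    · simp only [Bool.not_eq_true] at hv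
      simp only [hv, Bool.false_eq_true, if_false]
      have hs := exploreA_sim keys Gd hcl keys.length F p.1 vis pp c []
        (fun y hy => absurd hy (by simp)) (hl p List.mem_cons_self) hv
        (U_le_len keys vis) (lt_of_le_of_lt (U_le_len keys vis) hF)
      rw [hs, runB_nil]
      exact ih _ _ _ (fun q hq => hl q (List.mem_cons_of_mem _ hq))

-- ===== VERDICT (by name: the statement is the Claim_ definition above) =====
theorem dfs_spec : Claim_equal_dfs := by
  intro G _ hpre
  unfold Spec_dfs
  have hcl : ClosedG (G.map Prod.fst) (PySem.Dict.mk G) := by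
    intro w u hu
    rw [PySem.Dict.getD_eq_get?_getD] at hu
    cases hq : (PySem.Dict.mk G).get? w with
    | none => rw [hq] at hu; simp at hu
    | some l =>
      rw [hq] at hu
      simp only [Option.getD_some] at hu
      exact hpre.2 (w, l) (PySem.Dict.mem_items_of_get?_eq_some _ hq) u hu
  have hF : (G.map Prod.fst).length < G.length + 1 := by simp
  simp only [dfs, dfs_alt]
  rw [fold_sim (G.map Prod.fst) (PySem.Dict.mk G) hcl (G.length + 1) hF G _ _ _
    (fun p hp => List.mem_map.mpr ⟨p, hp, rfl⟩)]
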